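-- pv_equiv track=rewrite | github.com/TaniaTernovaya/Homeworks_Projector | Homework_8/cats.py | cats
-- ===== SOURCE A (Python) =====
-- def cats(number_cats: list, number_round) -> list:
--     cats = [1 for i in range(number_cats)]
--     result = []
--     for i in range(2, number_round + 1):
--         for number, cat in enumerate(cats):
--             if ((number + 1) % i == 0) and (cat == 0):
--                 cats[number] = 1
--             if ((number + 1) % i == 0) and (cat == 1):
--                 cats[number] = 0
--     for number, hat in enumerate(cats, start=1):
--         if hat == 1:
--             result.append(number)
--     return result
-- ===== SOURCE B (Python) =====
-- def cats(number_cats, number_round):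
--     # Divisor sieve: toggle parity per position by marking multiples of each
--     # round number; position stays 1 iff it was toggled an even number of times.
--     n = number_cats if number_cats > 0 else 0
--     parity = [0] * (n + 1)
--     top = min(number_round, n)   # a round i > n toggles no position <= n
--     for i in range(2, top + 1):
--         for m in range(i, n + 1, i):
--             parity[m] ^= 1
--     return [p for p in range(1, n + 1) if parity[p] == 0]
-- ===== Notes on version B (the rewrite author's own statement) =====
-- stated objective: faster
-- what changed: Replaced the rounds-by-cats double scan (toggle every position at every round) by a divisor sieve that marks only the multiples of each round number up to min(round, cats) and keeps positions with even toggle parity.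
import Mathlib
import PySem

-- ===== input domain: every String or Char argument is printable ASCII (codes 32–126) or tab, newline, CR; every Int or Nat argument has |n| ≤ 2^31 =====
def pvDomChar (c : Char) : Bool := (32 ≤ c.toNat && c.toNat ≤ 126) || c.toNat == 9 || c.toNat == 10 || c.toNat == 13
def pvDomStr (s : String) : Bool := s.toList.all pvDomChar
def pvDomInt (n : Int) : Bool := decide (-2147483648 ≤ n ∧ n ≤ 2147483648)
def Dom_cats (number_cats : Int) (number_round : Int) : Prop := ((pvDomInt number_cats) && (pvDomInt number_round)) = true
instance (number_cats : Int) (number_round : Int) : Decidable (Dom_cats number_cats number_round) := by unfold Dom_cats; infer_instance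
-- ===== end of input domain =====

-- B replaces A's rounds-by-cats double toggle scan by a divisor sieve that marks only the
-- multiples of each round number and keeps positions of even toggle parity (objective: faster).

-- ===== PORT A =====
-- one round of A's inner loop: fold over enumerate(cats), writing back at the visited index.
-- Exact: Python writes only at the index it has just read, so each enumerated value is the
-- original one and writes to earlier indices never affect later reads.
def catsRound (i : Int) (cs : List Int) : List Int :=
  (PySem.List.enumerate cs).foldl
    (fun cur nc =>
      let cur1 := if PySem.Int.mod (nc.1 + 1) i == 0 && nc.2 == 0
                  then PySem.List.pySetD cur nc.1 1 else cur
      if PySem.Int.mod (nc.1 + 1) i == 0 && nc.2 == 1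
      then PySem.List.pySetD cur1 nc.1 0 else cur1) cs

def cats (number_cats : Int) (number_round : Int) : List Int :=
  let cats0 : List Int := (PySem.List.pyRange 0 number_cats 1).map (fun _ => 1)
  let final := (PySem.List.pyRange 2 (number_round + 1) 1).foldl
    (fun cs i => catsRound i cs) cats0
  (PySem.List.enumerate final 1).foldl
    (fun r nh => if nh.2 == 1 then r ++ [nh.1] else r) []

-- ===== PORT B =====
def cats_alt (number_cats : Int) (number_round : Int) : List Int :=
  let n : Nat := number_cats.toNat
  let parity : List Int := List.replicate (n + 1) 0
  let top : Int := min number_round (n : Int)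
  let sieved := (PySem.List.pyRange 2 (top + 1) 1).foldl
    (fun par i => (PySem.List.pyRange i ((n : Int) + 1) i).foldl
        (fun par2 m => PySem.List.pySetD par2 m (1 - PySem.List.pyGetD par2 m 0)) par) parity
  (PySem.List.pyRange 1 ((n : Int) + 1) 1).filter
    (fun p => PySem.List.pyGetD sieved p 0 == 0)

-- ===== PRECONDITION & SPEC =====
def Spec_cats (number_cats : Int) (number_round : Int) (out : List Int) : Prop := out = cats_alt number_cats number_round
instance (number_cats : Int) (number_round : Int) (out : List Int) : Decidable (Spec_cats number_cats number_round out) := by unfold Spec_cats; infer_instance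

-- ===== CLAIM (what is proved, stated in full; the proofs are below) =====
def Claim_equal_cats : Prop := ∀ (number_cats : Int) (number_round : Int), Dom_cats number_cats number_round → Spec_cats number_cats number_round (cats number_cats number_round)

-- ===== LEMMAS AND PROOFS =====

def tog (js : List Int) (p : Int) : Nat := js.countP (fun i => PySem.Int.mod p i == 0)
def stA (js : List Int) (k : Nat) : Int := if tog js ((k : Int) + 1) % 2 = 0 then 1 else 0

theorem tog_append (js : List Int) (i p : Int) :
    tog (js ++ [i]) p = tog js p + (if PySem.Int.mod p i = 0 then 1 else 0) := by
  simp [tog, List.countP_append, List.countP_cons]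

theorem enum_map_range {α : Type} (f : Nat → α) (n : Nat) (s : Int) :
    PySem.List.enumerate ((List.range n).map f) s
      = (List.range n).map (fun k : Nat => ((s + k : Int), f k)) := by
  induction n with
  | zero => simp
  | succ n ih =>
    rw [List.range_succ, List.map_append, PySem.List.enumerate_append, ih, List.map_append]
    simp [PySem.List.enumerate_cons, PySem.List.enumerate_nil]

theorem catsRound_pass (i : Int) (cs : List Int) : ∀ (pre : List Int),
    (PySem.List.enumerate cs ((pre.length : Nat) : Int)).foldl
      (fun cur nc =>
        let cur1 := if PySem.Int.mod (nc.1 + 1) i == 0 && nc.2 == 0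
                    then PySem.List.pySetD cur nc.1 1 else cur
        if PySem.Int.mod (nc.1 + 1) i == 0 && nc.2 == 1
        then PySem.List.pySetD cur1 nc.1 0 else cur1) (pre ++ cs)
    = pre ++ (PySem.List.enumerate cs ((pre.length : Nat) : Int)).map
        (fun nc => if PySem.Int.mod (nc.1 + 1) i == 0 && nc.2 == 0 then 1
                   else if PySem.Int.mod (nc.1 + 1) i == 0 && nc.2 == 1 then 0 else nc.2) := by
  induction cs with
  | nil => intro pre; simp [PySem.List.enumerate_nil]
  | cons x rest ih =>
    intro pre
    rw [PySem.List.enumerate_cons, List.foldl_cons, List.map_cons]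
    set v : Int := if PySem.Int.mod ((pre.length : Int) + 1) i == 0 && x == 0 then 1
                   else if PySem.Int.mod ((pre.length : Int) + 1) i == 0 && x == 1 then 0 else x with hv
    have key : (let cur1 := if PySem.Int.mod ((((pre.length : Int)), x).1 + 1) i == 0 && (((pre.length : Int)), x).2 == 0
                    then PySem.List.pySetD (pre ++ x :: rest) (((pre.length : Int)), x).1 1 else pre ++ x :: rest
        if PySem.Int.mod ((((pre.length : Int)), x).1 + 1) i == 0 && (((pre.length : Int)), x).2 == 1
        then PySem.List.pySetD cur1 (((pre.length : Int)), x).1 0 else cur1)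
        = pre ++ v :: rest := by
      simp only [hv]
      by_cases hq : PySem.Int.mod ((pre.length : Int) + 1) i == 0
      · by_cases h0 : x = 0
        · simp [hq, h0, PySem.List.pySetD_natCast]
        · by_cases h1 : x = 1
          · simp [hq, h1, PySem.List.pySetD_natCast]
          · simp [hq, h0, h1]
      · simp [hq]
    rw [key]
    have := ih (pre ++ [v])
    simp only [List.length_append, List.length_cons, List.length_nil] at this ⊢
    rw [show ((pre.length : Int) + 1) = (((pre.length + 1 : Nat)) : Int) by push_cast; ring]
    rw [show pre ++ v :: rest = (pre ++ [v]) ++ rest by simp, this]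
    simp

theorem catsRound_map (n : Nat) (i : Int) (g : Nat → Int) (hg : ∀ k, g k = 0 ∨ g k = 1) :
    catsRound i ((List.range n).map g)
      = (List.range n).map
          (fun k : Nat => if PySem.Int.mod ((k : Int) + 1) i = 0 then 1 - g k else g k) := by
  unfold catsRound
  have h := catsRound_pass i ((List.range n).map g) []
  simp only [List.length_nil, Nat.cast_zero, List.nil_append] at h
  rw [h, enum_map_range, List.map_map]
  apply List.map_congr_left
  intro k _
  rcases hg k with h0 | h1
  · simp only [Function.comp_apply, h0, zero_add]
    split_ifs <;> simp_all
  · simp only [Function.comp_apply, h1, zero_add]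
    split_ifs <;> simp_all

theorem stA_mem (js : List Int) (k : Nat) : stA js k = 0 ∨ stA js k = 1 := by
  unfold stA; split_ifs <;> simp

theorem A_fold (n : Nat) (js : List Int) :
    js.foldl (fun cs i => catsRound i cs) ((List.range n).map (fun _ => (1 : Int)))
      = (List.range n).map (fun k => stA js k) := by
  induction js using List.reverseRecOn with
  | nil => simp [stA, tog]
  | append_singleton js i ih =>
    rw [List.foldl_append, List.foldl_cons, List.foldl_nil, ih,
        catsRound_map n i _ (stA_mem js)]
    apply List.map_congr_left
    intro k _
    simp only [stA, tog_append]
    split_ifs with h1 h2 h3 h2 h3 h3 <;> omega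

theorem A_closed (N R : Int) :
    cats N R = ((List.range N.toNat).filter
        (fun k => stA (PySem.List.pyRange 2 (R + 1) 1) k == 1)).map
        (fun k : Nat => 1 + (k : Int)) := by
  have h0 : (PySem.List.pyRange 0 N 1).map (fun _ => (1:Int))
      = (List.range N.toNat).map (fun _ => (1:Int)) := by
    rw [PySem.List.pyRange_one, List.map_map]
    simp [Function.comp_def, List.map_const']
  have e : cats N R = (PySem.List.enumerate ((PySem.List.pyRange 2 (R+1) 1).foldl
      (fun cs i => catsRound i cs) ((PySem.List.pyRange 0 N 1).map (fun _ => (1:Int)))) 1).foldl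
      (fun r nh => if nh.2 == 1 then r ++ [nh.1] else r) [] := rfl
  rw [e, h0, A_fold, enum_map_range,
      PySem.List.foldl_append_if (fun nh : Int × Int => nh.2 == 1) (fun nh : Int × Int => nh.1),
      List.filter_map, List.map_map]
  simp [Function.comp_def]


def stB (js : List Int) (p : Int) : Int := if tog js p % 2 = 0 then 0 else 1

theorem nodup_pyRange_pos (a b s : Int) (hs : 0 < s) : (PySem.List.pyRange a b s).Nodup := by
  rw [PySem.List.pyRange_of_pos a b hs]
  refine List.Nodup.map ?_ List.nodup_range
  intro x y h
  have h2 : (s : Int) * x = s * y := by linarith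
  have h3 : (x : Int) = y := mul_left_cancel₀ (by omega) h2
  exact_mod_cast h3

theorem flip_fold (ms : List Int) : ∀ (par : List Int), ms.Nodup →
    (∀ m ∈ ms, 0 ≤ m ∧ m < (par.length : Int)) →
    (ms.foldl (fun par2 m => PySem.List.pySetD par2 m (1 - PySem.List.pyGetD par2 m 0)) par).length = par.length ∧
    ∀ p : Int, 0 ≤ p →
      PySem.List.pyGetD (ms.foldl (fun par2 m => PySem.List.pySetD par2 m (1 - PySem.List.pyGetD par2 m 0)) par) p 0
        = if p ∈ ms then 1 - PySem.List.pyGetD par p 0 else PySem.List.pyGetD par p 0 := by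
  induction ms with
  | nil => intro par _ _; simp
  | cons m ms ih =>
    intro par hnd hb
    obtain ⟨hm0, hmlen⟩ := hb m (by simp)
    obtain ⟨mn, rfl⟩ : ∃ k : Nat, m = (k : Int) := ⟨m.toNat, (Int.toNat_of_nonneg hm0).symm⟩
    have hmlen' : mn < par.length := by exact_mod_cast hmlen
    set par' := PySem.List.pySetD par (mn : Int) (1 - PySem.List.pyGetD par (mn : Int) 0) with hpar'
    have hlen : par'.length = par.length := by
      simp [hpar', PySem.List.pySetD_natCast]
    obtain ⟨ihl, ihv⟩ := ih par' hnd.of_cons (by intro x hx; rw [hlen]; exact hb x (by simp [hx]))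
    refine ⟨by rw [List.foldl_cons, ihl, hlen], ?_⟩
    intro p hp
    obtain ⟨pn, rfl⟩ : ∃ k : Nat, p = (k : Int) := ⟨p.toNat, (Int.toNat_of_nonneg hp).symm⟩
    rw [List.foldl_cons, ihv _ hp]
    have hget : PySem.List.pyGetD par' (pn : Int) 0
        = if pn = mn then 1 - PySem.List.pyGetD par (mn : Int) 0 else PySem.List.pyGetD par (pn : Int) 0 :=
      PySem.List.pyGetD_pySetD_natCast par mn pn _ 0 hmlen'
    have hmnot : ((mn : Int) ∉ ms) := (List.nodup_cons.mp hnd).1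
    by_cases hpm : pn = mn
    · subst hpm
      simp [List.mem_cons, hmnot, hget]
    · have hpm' : ((pn : Int) ≠ (mn : Int)) := by exact_mod_cast hpm
      by_cases hpms : (pn : Int) ∈ ms <;> simp [List.mem_cons, hpm, hpm', hpms, hget]

theorem mem_mult (n : Nat) (i p : Int) (hi : 2 ≤ i) (hp : 1 ≤ p) :
    (p ∈ PySem.List.pyRange i ((n : Int) + 1) i) ↔ (PySem.Int.mod p i = 0 ∧ p ≤ (n : Int)) := by
  rw [PySem.List.mem_pyRange_iff_of_pos (by omega : (0:Int) < i), PySem.Int.mod_eq_zero_iff_dvd]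
  constructor
  · rintro ⟨h1, h2, h3⟩
    have hd : i ∣ p := by
      have := dvd_add h3 (dvd_refl i)
      simpa using this
    exact ⟨hd, by omega⟩
  · rintro ⟨hd, h2⟩
    have hle : i ≤ p := Int.le_of_dvd (by omega) hd
    exact ⟨hle, by omega, dvd_sub hd (dvd_refl i)⟩

theorem B_fold (n : Nat) (js : List Int) (hjs : ∀ i ∈ js, 2 ≤ i) :
    (js.foldl (fun par i => (PySem.List.pyRange i ((n : Int) + 1) i).foldl
        (fun par2 m => PySem.List.pySetD par2 m (1 - PySem.List.pyGetD par2 m 0)) par)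
      (List.replicate (n + 1) (0 : Int))).length = n + 1 ∧
    ∀ p : Int, 1 ≤ p → p ≤ (n : Int) →
      PySem.List.pyGetD (js.foldl (fun par i => (PySem.List.pyRange i ((n : Int) + 1) i).foldl
          (fun par2 m => PySem.List.pySetD par2 m (1 - PySem.List.pyGetD par2 m 0)) par)
        (List.replicate (n + 1) (0 : Int))) p 0 = stB js p := by
  induction js using List.reverseRecOn with
  | nil =>
    refine ⟨by simp, ?_⟩
    intro p hp1 hpn
    obtain ⟨pn, rfl⟩ : ∃ k : Nat, p = (k : Int) := ⟨p.toNat, (Int.toNat_of_nonneg (by omega)).symm⟩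
    have hlt : pn < n + 1 := by exact_mod_cast Int.lt_add_one_of_le hpn
    simp only [List.foldl_nil, PySem.List.pyGetD_natCast]
    simp [List.getD_eq_getElem?_getD, hlt, stB, tog]
  | append_singleton js i ih =>
    have hjs' : ∀ j ∈ js, 2 ≤ j := fun j hj => hjs j (by simp [hj])
    have hi : 2 ≤ i := hjs i (by simp)
    obtain ⟨ihl, ihv⟩ := ih hjs'
    simp only [List.foldl_append, List.foldl_cons, List.foldl_nil]
    set res := js.foldl (fun par i => (PySem.List.pyRange i ((n : Int) + 1) i).foldl
        (fun par2 m => PySem.List.pySetD par2 m (1 - PySem.List.pyGetD par2 m 0)) par)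
      (List.replicate (n + 1) (0 : Int)) with hres
    have hlenres : res.length = n + 1 := by rw [hres]; exact ihl
    have hvres : ∀ p : Int, 1 ≤ p → p ≤ (n : Int) → PySem.List.pyGetD res p 0 = stB js p := by
      rw [hres]; exact ihv
    have hnd : (PySem.List.pyRange i ((n : Int) + 1) i).Nodup := nodup_pyRange_pos _ _ _ (by omega)
    have hbnd : ∀ m ∈ PySem.List.pyRange i ((n : Int) + 1) i, 0 ≤ m ∧ m < (res.length : Int) := by
      intro m hm
      rw [PySem.List.mem_pyRange_iff_of_pos (by omega : (0:Int) < i)] at hm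
      rw [hlenres]
      push_cast
      omega
    obtain ⟨fl, fv⟩ := flip_fold (PySem.List.pyRange i ((n : Int) + 1) i) res hnd hbnd
    refine ⟨fl.trans hlenres, ?_⟩
    intro p hp1 hpn
    have hval := fv p (by omega)
    rw [hvres p hp1 hpn] at hval
    refine hval.trans ?_
    simp only [mem_mult n i p hi hp1]
    simp only [stB, tog_append]
    by_cases hmod : PySem.Int.mod p i = 0
    · rw [if_pos ⟨hmod, hpn⟩, if_pos hmod]
      split_ifs <;> omega
    · rw [if_neg (by tauto), if_neg hmod]
      simp

theorem B_closed (N R : Int) :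
    cats_alt N R = ((List.range N.toNat).filter
        (fun k : Nat => stB (PySem.List.pyRange 2 (min R (N.toNat : Int) + 1) 1) (1 + (k : Int)) == 0)).map
        (fun k : Nat => 1 + (k : Int)) := by
  have e : cats_alt N R = (PySem.List.pyRange 1 ((N.toNat : Int) + 1) 1).filter
      (fun p => PySem.List.pyGetD ((PySem.List.pyRange 2 (min R (N.toNat : Int) + 1) 1).foldl
        (fun par i => (PySem.List.pyRange i ((N.toNat : Int) + 1) i).foldl
          (fun par2 m => PySem.List.pySetD par2 m (1 - PySem.List.pyGetD par2 m 0)) par)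
        (List.replicate (N.toNat + 1) (0 : Int))) p 0 == 0) := rfl
  have hr : PySem.List.pyRange 1 ((N.toNat : Int) + 1) 1
      = (List.range N.toNat).map (fun k : Nat => 1 + (k : Int)) := by
    rw [PySem.List.pyRange_one, show ((N.toNat : Int) + 1 - 1).toNat = N.toNat by omega]
  rw [e, hr, List.filter_map]
  congr 1
  apply List.filter_congr
  intro k hk
  have hk' := List.mem_range.mp hk
  obtain ⟨_, hv⟩ := B_fold N.toNat (PySem.List.pyRange 2 (min R (N.toNat : Int) + 1) 1)
    (fun i hi => (PySem.List.mem_pyRange_one.mp hi).1)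
  have hb := hv (1 + (k : Int)) (by omega) (by omega)
  simp only [Function.comp_def, hb]

theorem tog_trunc (N : Nat) (R p : Int) (hp1 : 1 ≤ p) (hpn : p ≤ (N : Int)) :
    tog (PySem.List.pyRange 2 (R + 1) 1) p
      = tog (PySem.List.pyRange 2 (min R (N : Int) + 1) 1) p := by
  rcases le_total R (N : Int) with h | h
  · rw [min_eq_left h]
  · rw [min_eq_right h]
    rw [PySem.List.pyRange_one_append 2 ((N : Int) + 1) (R + 1) (by omega) (by omega)]
    unfold tog
    rw [List.countP_append]
    have hz : (PySem.List.pyRange ((N : Int) + 1) (R + 1) 1).countP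
        (fun i => PySem.Int.mod p i == 0) = 0 := by
      rw [List.countP_eq_zero]
      intro i hi
      rw [PySem.List.mem_pyRange_one] at hi
      simp only [beq_iff_eq]
      intro heq
      have hd : i ∣ p := (PySem.Int.mod_eq_zero_iff_dvd p i).mp heq
      have := Int.le_of_dvd (by omega) hd
      omega
    omega

-- ===== VERDICT (by name: the statement is the Claim_ definition above) =====
theorem cats_spec : Claim_equal_cats := by
  intro N R _
  unfold Spec_cats
  rw [A_closed, B_closed]
  congr 1
  apply List.filter_congr
  intro k hk
  have hk' : k < N.toNat := List.mem_range.mp hk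
  have h := tog_trunc N.toNat R ((k : Int) + 1) (by omega) (by omega)
  simp only [stA, stB]
  rw [show (1 : Int) + (k : Int) = (k : Int) + 1 by ring, ← h]
  split_ifs <;> simp_all
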